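-- pv_equiv track=rewrite | github.com/tasmirz/TLE | tle/util/codeforces_common.py | filter_flags
-- ===== SOURCE A (Python) =====
-- def filter_flags(args, params):
--     args = list(args)
--     flags = [False] * len(params)
--     rest = []
--     for arg in args:
--         try:
--             flags[params.index(arg)] = True
--         except ValueError:
--             rest.append(arg)
--     return flags, rest
-- ===== SOURCE B (Python) =====
-- def filter_flags(args, params):
--     argset = set(args)
--     paramset = set(params)
--     flags = []
--     seen = set()
--     for p in params:
--         flags.append(p in argset and p not in seen)
--         seen.add(p)
--     rest = [a for a in args if a not in paramset]
--     return flags, rest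
-- ===== Notes on version B (the rewrite author's own statement) =====
-- stated objective: faster
-- what changed: Loops over params with an args-set and a seen-set (first-occurrence guard) to build flags, and computes rest as a separate set-membership filter over args, instead of A's args-loop with repeated params.index and try/except.
import Mathlib
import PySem

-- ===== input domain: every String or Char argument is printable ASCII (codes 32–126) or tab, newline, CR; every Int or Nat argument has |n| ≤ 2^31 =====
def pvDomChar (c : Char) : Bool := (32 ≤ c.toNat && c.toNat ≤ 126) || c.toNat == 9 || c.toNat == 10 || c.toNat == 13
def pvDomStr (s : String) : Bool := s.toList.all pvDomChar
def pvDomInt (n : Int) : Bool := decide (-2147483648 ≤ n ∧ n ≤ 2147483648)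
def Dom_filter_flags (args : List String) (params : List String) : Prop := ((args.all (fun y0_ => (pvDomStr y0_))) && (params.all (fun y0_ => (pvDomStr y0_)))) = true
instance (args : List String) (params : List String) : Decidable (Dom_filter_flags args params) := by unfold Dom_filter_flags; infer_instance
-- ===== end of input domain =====

-- B builds flags by a params-loop over an args-set with a seen-set (first-occurrence guard) and rest by a set-membership filter, replacing A's args-loop with repeated params.index; same values, measured faster in a timing run.

-- ===== PORT A =====
-- A: one pass over args; try: flags[params.index(arg)] = True; except ValueError: rest.append(arg)
def filter_flags (args : List String) (params : List String) : List Bool × List String :=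
  args.foldl
    (fun (st : List Bool × List String) arg =>
      match PySem.List.index? params arg with
      | some j => (st.1.set j true, st.2)        -- index() succeeded: j < len(params) = len(flags)
      | none   => (st.1, st.2 ++ [arg]))         -- ValueError branch
    (List.replicate params.length false, [])

-- ===== PORT B =====
def filter_flags_alt (args : List String) (params : List String) : List Bool × List String :=
  let argset : PySem.Set String := PySem.Set.ofList args
  let paramset : PySem.Set String := PySem.Set.ofList params
  let res := params.foldl
    (fun (st : List Bool × PySem.Set String) p =>
      (st.1 ++ [argset.contains p && !(st.2.contains p)], st.2.add p))
    ([], PySem.Set.ofList [])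
  (res.1, args.filter (fun a => !(paramset.contains a)))

-- ===== PRECONDITION & SPEC =====
def Spec_filter_flags (args : List String) (params : List String) (out : List Bool × List String) : Prop := out = filter_flags_alt args params
instance (args : List String) (params : List String) (out : List Bool × List String) : Decidable (Spec_filter_flags args params out) := by unfold Spec_filter_flags; infer_instance

-- ===== CLAIM (what is proved, stated in full; the proofs are below) =====
def Claim_equal_filter_flags : Prop := ∀ (args : List String) (params : List String), Dom_filter_flags args params → Spec_filter_flags args params (filter_flags args params)

-- ===== LEMMAS AND PROOFS =====

-- flags-only accumulator of A's loop
def step1 (params : List String) (f : List Bool) (a : String) : List Bool :=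
  match PySem.List.index? params a with | some j => f.set j true | none => f

def updAll (params : List String) (f : List Bool) (args : List String) : List Bool :=
  args.foldl (step1 params) f

lemma foldA_eq (params : List String) : ∀ (args : List String) (f : List Bool) (r : List String),
    args.foldl
      (fun (st : List Bool × List String) arg =>
        match PySem.List.index? params arg with
        | some j => (st.1.set j true, st.2)
        | none   => (st.1, st.2 ++ [arg]))
      (f, r)
    = (updAll params f args, r ++ args.filter (fun a => (PySem.List.index? params a).isNone)) := by
  intro args
  induction args with
  | nil => intro f r; simp [updAll]
  | cons a t ih =>
    intro f r
    simp only [List.foldl_cons, updAll, List.filter_cons, step1]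
    cases h : PySem.List.index? params a with
    | some j =>
      rw [ih]
      simp [updAll]
    | none =>
      rw [ih]
      simp [updAll]

lemma updAll_length (params : List String) : ∀ (args : List String) (f : List Bool),
    (updAll params f args).length = f.length := by
  intro args
  induction args with
  | nil => intro f; simp [updAll]
  | cons a t ih =>
    intro f
    simp only [updAll, List.foldl_cons]
    have : updAll params f (a :: t) = updAll params (step1 params f a) t := by simp [updAll]
    have hl := ih (step1 params f a)
    simp only [updAll] at hl
    rw [hl]
    cases hx : List.idxOf? a params <;> simp [step1, hx]

lemma updAll_getElem (params : List String) : ∀ (args : List String) (f : List Bool) (i : Nat)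
    (h : i < f.length) (h' : i < (updAll params f args).length),
    (updAll params f args)[i] = (f[i] || args.any (fun a => PySem.List.index? params a == some i)) := by
  intro args
  induction args with
  | nil => intro f i h h'; simp [updAll]
  | cons a t ih =>
    intro f i h h'
    have hstep : updAll params f (a :: t) = updAll params (step1 params f a) t := by
      simp [updAll]
    have hlen : i < (step1 params f a).length := by
      cases hx : List.idxOf? a params <;> simp [step1, hx, h]
    have h2 : i < (updAll params (step1 params f a) t).length := hstep ▸ h'
    simp only [hstep]
    rw [ih (step1 params f a) i hlen h2]
    cases hx : List.idxOf? a params with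
    | some j =>
      by_cases hij : i = j
      · subst hij; simp [step1, hx, List.getElem_set]
      · have hji : (j == i) = false := beq_eq_false_iff_ne.mpr (Ne.symm hij)
        simp [step1, hx, List.getElem_set, Ne.symm hij, hji]
    | none => simp [step1, hx]

-- B's flags loop, flags-only accumulator with an explicit seen set
def bflags (argset : PySem.Set String) : List String → PySem.Set String → List Bool
  | [], _ => []
  | p :: t, seen => (argset.contains p && !(seen.contains p)) :: bflags argset t (seen.add p)

lemma foldB_eq (argset : PySem.Set String) : ∀ (ps : List String) (fl : List Bool) (seen : PySem.Set String),
    (ps.foldl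
      (fun (st : List Bool × PySem.Set String) p =>
        (st.1 ++ [argset.contains p && !(st.2.contains p)], st.2.add p))
      (fl, seen)).1
    = fl ++ bflags argset ps seen := by
  intro ps
  induction ps with
  | nil => intro fl seen; simp [bflags]
  | cons p t ih =>
    intro fl seen
    simp only [List.foldl_cons]
    rw [ih]
    simp [bflags]

lemma bflags_length (argset : PySem.Set String) : ∀ (ps : List String) (seen : PySem.Set String),
    (bflags argset ps seen).length = ps.length := by
  intro ps
  induction ps with
  | nil => intro seen; simp [bflags]
  | cons p t ih => intro seen; simp [bflags, ih]

lemma bflags_getElem (argset : PySem.Set String) : ∀ (ps : List String) (seen : PySem.Set String)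
    (i : Nat) (h : i < ps.length) (h' : i < (bflags argset ps seen).length),
    (bflags argset ps seen)[i]
      = (argset.contains ps[i] && !(seen.contains ps[i] || (ps.take i).contains ps[i])) := by
  intro ps
  induction ps with
  | nil => intro seen i h h'; simp at h
  | cons p t ih =>
    intro seen i h h'
    cases i with
    | zero => simp [bflags]
    | succ n =>
      simp only [bflags, List.getElem_cons_succ, List.take_succ_cons]
      have hn : n < t.length := by simpa using h
      rw [ih (seen.add p) n hn (by simpa [bflags_length] using hn)]
      by_cases hp : p = t[n]
      · subst hp
        by_cases hm : t[n] ∈ seen <;> simp [PySem.Set.add, hm]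
      · by_cases hm : p ∈ seen <;> by_cases hm2 : t[n] ∈ seen <;>
          simp [PySem.Set.add, hm, hm2, Ne.symm hp]

-- the crux: A marks index i iff params[i] occurs in args and is the first occurrence of its value
lemma any_index?_iff (args params : List String) (i : Nat) (h : i < params.length) :
    (args.any (fun a => PySem.List.index? params a == some i))
      = (args.contains params[i] && !((params.take i).contains params[i])) := by
  cases hc : (args.contains params[i] && !((params.take i).contains params[i])) with
  | true =>
    simp only [Bool.and_eq_true, Bool.not_eq_true', List.contains_eq_mem, decide_eq_true_eq,
      decide_eq_false_iff_not] at hc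
    obtain ⟨hmem, hpre⟩ := hc
    rw [List.any_eq_true]
    refine ⟨params[i], hmem, ?_⟩
    have : PySem.List.index? params params[i] = some i := by
      rw [PySem.List.index?_eq_some_iff]
      exact ⟨params.take i, params.drop (i + 1), by
        rw [List.getElem_cons_drop]; exact (List.take_append_drop i params).symm,
        by simp [Nat.le_of_lt h], hpre⟩
    simp only [PySem.List.index?_eq_idxOf?] at this
    simp [this]
  | false =>
    simp only [Bool.and_eq_false_iff, Bool.not_eq_false', List.contains_eq_mem,
      decide_eq_false_iff_not, decide_eq_true_eq] at hc
    rw [List.any_eq_false]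
    intro a ha
    simp only [beq_iff_eq]
    intro hidx
    obtain ⟨hk, hget, hfirst⟩ := PySem.List.getElem_of_index?_eq_some hidx
    rcases hc with hc | hc
    · exact hc (hget ▸ ha)
    · have : params[i] ∈ params.take i := hc
      obtain ⟨j, hj, hje⟩ := List.getElem_of_mem (l := params.take i) this
      have hji : j < i := by simp at hj; exact hj.1
      have hjp : j < params.length := Nat.lt_trans hji h
      have : params[j] = params[i] := by
        rw [List.getElem_take] at hje; exact hje
      exact hfirst j hji (by rw [this, hget])

lemma rest_eq (args params : List String) :
    args.filter (fun a => (PySem.List.index? params a).isNone)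
      = args.filter (fun a => !((PySem.Set.ofList params).contains a)) := by
  apply List.filter_congr
  intro a _
  simp only [PySem.Set.contains, PySem.Set.mem_ofList]
  by_cases hm : a ∈ params
  · have : PySem.List.index? params a ≠ none := by
      rw [Ne, PySem.List.index?_eq_none_iff]; simpa using hm
    cases hx : PySem.List.index? params a with
    | none => exact absurd hx this
    | some j => simp only [PySem.List.index?_eq_idxOf?] at hx; simp [hm]
  · have : PySem.List.index? params a = none := by
      rw [PySem.List.index?_eq_none_iff]; simpa using hm
    simp only [PySem.List.index?_eq_idxOf?] at this
    simp [this, hm]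

-- ===== VERDICT (by name: the statement is the Claim_ definition above) =====
theorem filter_flags_spec : Claim_equal_filter_flags := by
  intro args params _
  unfold Spec_filter_flags filter_flags filter_flags_alt
  rw [foldA_eq]
  dsimp only
  rw [foldB_eq]
  refine Prod.ext ?_ ?_
  · show updAll params (List.replicate params.length false) args
      = [] ++ bflags (PySem.Set.ofList args) params (PySem.Set.ofList [])
    rw [List.nil_append]
    apply List.ext_getElem
    · simp [updAll_length, bflags_length]
    · intro i h1 h2
      rw [updAll_getElem params args _ i (by simpa [updAll_length] using h1) h1,
          bflags_getElem _ params _ i (by simpa [bflags_length] using h2) h2]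
      have hi : i < params.length := by simpa [bflags_length] using h2
      rw [any_index?_iff args params i hi]
      simp [PySem.Set.mem_ofList]
  · show [] ++ args.filter (fun a => (PySem.List.index? params a).isNone)
      = args.filter (fun a => !((PySem.Set.ofList params).contains a))
    simpa using rest_eq args params
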